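-- pv_equiv track=rewrite | github.com/Juhyun22/Coding_Test | programmers/음양더하기.py | solution
-- ===== SOURCE A (Python) =====
-- def solution(absolutes, signs):
--   sum = 0
--   for i in range(len(signs)):
--     if signs[i]:
--       sum += absolutes[i]
--     else:
--       sum += absolutes[i] * -1
--   return sum
-- ===== SOURCE B (Python) =====
-- def solution(absolutes, signs):
--   n = len(signs)
--   total = sum(absolutes[i] for i in range(n))
--   neg = sum(absolutes[i] for i in range(n) if not signs[i])
--   return total - 2 * neg
-- ===== Notes on version B (the rewrite author's own statement) =====
-- stated objective: alternative
-- what changed: Replaces the per-element if/else sign accumulation with two aggregate sums (the plain total and the sum of absolutes at falsy signs) combined as total - 2*neg.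
import Mathlib
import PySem

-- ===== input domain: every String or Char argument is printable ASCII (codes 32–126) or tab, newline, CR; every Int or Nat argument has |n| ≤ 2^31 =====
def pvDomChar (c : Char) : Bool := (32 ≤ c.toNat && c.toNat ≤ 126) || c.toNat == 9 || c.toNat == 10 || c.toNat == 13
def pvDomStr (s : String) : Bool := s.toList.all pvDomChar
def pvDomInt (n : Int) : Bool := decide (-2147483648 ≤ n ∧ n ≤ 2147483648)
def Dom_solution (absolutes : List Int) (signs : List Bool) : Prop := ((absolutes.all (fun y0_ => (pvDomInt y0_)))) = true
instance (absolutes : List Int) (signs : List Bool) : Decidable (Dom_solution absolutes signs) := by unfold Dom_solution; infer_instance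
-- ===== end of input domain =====

-- B computes the same signed sum as total-of-absolutes minus twice the sum at falsy signs, an alternative decomposition of A's per-element if/else loop.


-- ===== PORT A =====
-- A: running sum, per index i in range(len(signs)): +absolutes[i] if signs[i] else +absolutes[i]*(-1).
-- pyGetD with default is exact on Pre_ (all indexed accesses in range).
def solution (absolutes : List Int) (signs : List Bool) : Int :=
  (PySem.List.pyRange 0 (signs.length : Int) 1).foldl
    (fun s i =>
      if PySem.List.pyGetD signs i false then
        s + PySem.List.pyGetD absolutes i 0
      else
        s + (PySem.List.pyGetD absolutes i 0) * (-1)) 0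

-- ===== PORT B =====
-- B: total of absolutes over range(n), minus twice the sum over indices with falsy sign.
def solution_alt (absolutes : List Int) (signs : List Bool) : Int :=
  let n : Int := (signs.length : Int)
  let total := ((PySem.List.pyRange 0 n 1).map (fun i => PySem.List.pyGetD absolutes i 0)).sum
  let neg := (((PySem.List.pyRange 0 n 1).filter
      (fun i => !(PySem.List.pyGetD signs i false))).map
      (fun i => PySem.List.pyGetD absolutes i 0)).sum
  total - 2 * neg

-- ===== PRECONDITION & SPEC =====
-- Pre_ excludes exactly the inputs on which A raises IndexError: signs longer than absolutes.
def Pre_solution (absolutes : List Int) (signs : List Bool) : Prop :=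
  signs.length ≤ absolutes.length
instance (absolutes : List Int) (signs : List Bool) : Decidable (Pre_solution absolutes signs) := by
  unfold Pre_solution; infer_instance
def pvWitness_solution : List Int × List Bool := ([4, 7, 12], [true, false, true])

def Spec_solution (absolutes : List Int) (signs : List Bool) (out : Int) : Prop := out = solution_alt absolutes signs
instance (absolutes : List Int) (signs : List Bool) (out : Int) : Decidable (Spec_solution absolutes signs out) := by unfold Spec_solution; infer_instance

-- ===== CLAIM (what is proved, stated in full; the proofs are below) =====
def Claim_equal_solution : Prop := ∀ (absolutes : List Int) (signs : List Bool), Dom_solution absolutes signs → Pre_solution absolutes signs → Spec_solution absolutes signs (solution absolutes signs)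

-- ===== LEMMAS AND PROOFS =====
theorem solution_key (absolutes : List Int) (signs : List Bool) (n : Nat) :
    (PySem.List.pyRange 0 (n : Int) 1).foldl
      (fun s i =>
        if PySem.List.pyGetD signs i false then
          s + PySem.List.pyGetD absolutes i 0
        else
          s + (PySem.List.pyGetD absolutes i 0) * (-1)) 0
    = ((PySem.List.pyRange 0 (n : Int) 1).map (fun i => PySem.List.pyGetD absolutes i 0)).sum
      - 2 * (((PySem.List.pyRange 0 (n : Int) 1).filter
          (fun i => !(PySem.List.pyGetD signs i false))).map
          (fun i => PySem.List.pyGetD absolutes i 0)).sum := by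
  induction n with
  | zero => simp [PySem.List.pyRange_one_eq_nil]
  | succ m ih =>
    have h : ((m : Int) + 1) = ((m : Int)) + 1 := rfl
    have hsplit : PySem.List.pyRange 0 ((m + 1 : Nat) : Int) 1
        = PySem.List.pyRange 0 (m : Int) 1 ++ [(m : Int)] := by
      push_cast
      exact PySem.List.pyRange_one_succ_right (by exact_mod_cast Nat.zero_le m)
    rw [hsplit, List.foldl_append, List.map_append, List.filter_append, List.map_append,
      List.sum_append, List.sum_append, ih]
    by_cases hs : PySem.List.pyGetD signs (m : Int) false = true <;>
      simp [hs] <;> ring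

theorem solution_spec : Claim_equal_solution := by
  intro absolutes signs _ _
  unfold Spec_solution solution solution_alt
  simpa using solution_key absolutes signs signs.length
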